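-- pv_equiv track=rewrite | github.com/facebookresearch/mmd | rules/predicate.py | equi_freq
-- ===== SOURCE A (Python) =====
-- import math
-- from typing import Dict, Set, List
--
-- def equi_freq(values: Set, num_bins: int):
--     cutoffs = set()
--     sorted_values = sorted(values)
--
--     num_values = len(sorted_values)
--
--     # number of bins > number of unique values
--     if num_bins > num_values:
--         # Use square-root choice
--         num_bins = math.ceil(math.sqrt(num_values))
--
--     values_ratio = int(num_values / num_bins)
--
--     for i in range(0, num_bins):
--         arr = []
--         for j in range(i * values_ratio, (i + 1) * values_ratio):
--             if j >= num_values: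
--                 break
--             arr = arr + [sorted_values[j]]
--
--         cutoff = arr[len(arr) - 1]
--         cutoffs.add(cutoff)
--
--     return cutoffs
-- ===== SOURCE B (Python) =====
-- import math
--
-- def equi_freq(values, num_bins):
--     sorted_values = sorted(values)
--     n = len(sorted_values)
--     if num_bins > n:
--         num_bins = math.ceil(math.sqrt(n))
--     ratio = int(n / num_bins)
--     return {sorted_values[min((i + 1) * ratio, n) - 1] for i in range(num_bins)}
-- ===== Notes on version B (the rewrite author's own statement) =====
-- stated objective: faster
-- what changed: B replaces A's inner element-copying loop (quadratic-cost list concatenation arr = arr + [v] per element) with a direct index formula sorted_values[min((i+1)*ratio, n) - 1] per bin, built as a single set comprehension.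
import Mathlib
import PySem

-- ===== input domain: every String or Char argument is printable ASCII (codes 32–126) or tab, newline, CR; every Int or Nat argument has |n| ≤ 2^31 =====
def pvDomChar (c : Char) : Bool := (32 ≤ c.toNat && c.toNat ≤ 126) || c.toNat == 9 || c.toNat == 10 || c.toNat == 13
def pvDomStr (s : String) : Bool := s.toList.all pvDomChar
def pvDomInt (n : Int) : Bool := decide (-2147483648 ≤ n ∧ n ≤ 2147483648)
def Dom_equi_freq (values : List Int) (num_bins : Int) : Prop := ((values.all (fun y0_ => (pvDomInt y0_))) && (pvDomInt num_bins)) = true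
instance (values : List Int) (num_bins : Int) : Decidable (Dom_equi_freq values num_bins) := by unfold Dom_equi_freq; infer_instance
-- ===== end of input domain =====

-- B removes A's inner per-element copying loop: each bin's cutoff is read directly at
-- sorted_values[min((i+1)*ratio, n) - 1]; equivalence of the return value is proved on Pre_.

-- ===== PORT A =====
-- math.ceil(math.sqrt(n)) for a nonnegative int n (exact on this integer domain)
def pvCeilSqrt (n : Nat) : Nat :=
  if Nat.sqrt n * Nat.sqrt n = n then Nat.sqrt n else Nat.sqrt n + 1

-- A's inner 'for j in range(...): if j >= num_values: break; arr = arr + [sorted_values[j]]'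
def pvArrLoop (sorted_values : List Int) (num_values : Int) (arr : List Int) : List Int → List Int
  | [] => arr
  | j :: js =>
    if j ≥ num_values then arr
    else pvArrLoop sorted_values num_values (arr ++ [PySem.List.pyGetD sorted_values j 0]) js

def equi_freq (values : List Int) (num_bins : Int) : List Int :=
  let cutoffs : PySem.Set Int := PySem.Set.empty
  let sorted_values := PySem.List.sorted (PySem.Set.ofList values) (fun x => x) false
  let num_values : Int := PySem.List.len sorted_values
  let num_bins : Int := if num_bins > num_values then (pvCeilSqrt sorted_values.length : Int) else num_bins
  -- int(num_values / num_bins): truncating division (Python raises on num_bins = 0: outside Pre_)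
  let values_ratio : Int := PySem.Int.truncdiv num_values num_bins
  (PySem.List.pyRange 0 num_bins 1).foldl
    (fun cutoffs i =>
      let arr := pvArrLoop sorted_values num_values []
        (PySem.List.pyRange (i * values_ratio) ((i + 1) * values_ratio) 1)
      -- arr[len(arr) - 1] (raises on empty arr; never empty inside Pre_)
      let cutoff := PySem.List.pyGetD arr (PySem.List.len arr - 1) 0
      PySem.Set.add cutoffs cutoff)
    cutoffs

-- ===== PORT B =====
def equi_freq_alt (values : List Int) (num_bins : Int) : List Int :=
  let sorted_values := PySem.List.sorted (PySem.Set.ofList values) (fun x => x) false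
  let n : Int := PySem.List.len sorted_values
  let num_bins : Int := if num_bins > n then (pvCeilSqrt sorted_values.length : Int) else num_bins
  let ratio : Int := PySem.Int.truncdiv n num_bins
  PySem.Set.ofList ((PySem.List.pyRange 0 num_bins 1).map
    (fun i => PySem.List.pyGetD sorted_values (min ((i + 1) * ratio) n - 1) 0))

-- ===== PRECONDITION & SPEC =====
-- Pre_ excludes exactly the inputs where Python A raises ZeroDivisionError:
-- num_bins = 0, or an empty value set with num_bins ≥ 1 (then num_bins is reset to ceil(sqrt(0)) = 0).
def Pre_equi_freq (values : List Int) (num_bins : Int) : Prop :=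
  num_bins ≠ 0 ∧ (values ≠ [] ∨ num_bins < 0)
instance (values : List Int) (num_bins : Int) : Decidable (Pre_equi_freq values num_bins) := by
  unfold Pre_equi_freq; infer_instance
def pvWitness_equi_freq : List Int × Int := ([3, 1, 7, 5], 2)
def Spec_equi_freq (values : List Int) (num_bins : Int) (out : List Int) : Prop := out = equi_freq_alt values num_bins
instance (values : List Int) (num_bins : Int) (out : List Int) : Decidable (Spec_equi_freq values num_bins out) := by unfold Spec_equi_freq; infer_instance

-- ===== CLAIM (what is proved, stated in full; the proofs are below) =====
def Claim_equal_equi_freq : Prop := ∀ (values : List Int) (num_bins : Int), Dom_equi_freq values num_bins → Pre_equi_freq values num_bins → Spec_equi_freq values num_bins (equi_freq values num_bins)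

-- ===== LEMMAS AND PROOFS =====

-- A's inner loop appends the images of the prefix of indices below num_values
theorem pvArrLoop_eq_takeWhile (sv : List Int) (n : Int) (arr : List Int) (js : List Int) :
    pvArrLoop sv n arr js
      = arr ++ (js.takeWhile (fun j => decide (j < n))).map (fun j => PySem.List.pyGetD sv j 0) := by
  induction js generalizing arr with
  | nil => simp [pvArrLoop]
  | cons j js ih =>
    by_cases h : j ≥ n
    · simp [pvArrLoop, h, show ¬ j < n by omega]
    · simp [pvArrLoop, h, show j < n by omega, ih]

theorem takeWhile_pyRange (n b : Int) : ∀ (m : Nat) (a : Int), (b - a).toNat = m →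
    (PySem.List.pyRange a b 1).takeWhile (fun j => decide (j < n))
      = PySem.List.pyRange a (min b n) 1 := by
  intro m
  induction m with
  | zero =>
    intro a hm
    rw [PySem.List.pyRange_one_eq_nil (by omega),
        PySem.List.pyRange_one_eq_nil (by omega : min b n ≤ a)]
    rfl
  | succ k ih =>
    intro a hm
    rw [PySem.List.pyRange_one_cons (by omega : a < b)]
    by_cases h : a < n
    · have hrec := ih (a + 1) (by omega)
      simp [h, hrec,
        PySem.List.pyRange_one_cons (by omega : a < min b n)]
    · simp [h,
        PySem.List.pyRange_one_eq_nil (by omega : min b n ≤ a)]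

-- one bin: A's arr-building and last-element read equals B's direct index
theorem pv_cutoff_eq (sv : List Int) (r i : Int) (hr : 1 ≤ r) (_hi : 0 ≤ i)
    (hin : i * r < (sv.length : Int)) :
    (let arr := pvArrLoop sv (PySem.List.len sv) []
        (PySem.List.pyRange (i * r) ((i + 1) * r) 1)
     PySem.List.pyGetD arr (PySem.List.len arr - 1) 0)
      = PySem.List.pyGetD sv (min ((i + 1) * r) (PySem.List.len sv) - 1) 0 := by
  simp only [PySem.List.len_eq]
  have hb : i * r < (i + 1) * r := by nlinarith
  set nn : Int := (sv.length : Int) with hnn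
  set a : Int := i * r with ha
  set b : Int := (i + 1) * r with hbdef
  set c : Int := min b nn with hc
  have hac : a < c := by omega
  rw [pvArrLoop_eq_takeWhile, takeWhile_pyRange nn b (b - a).toNat a rfl, List.nil_append]
  have hlen : ((PySem.List.pyRange a c 1).map (fun j => PySem.List.pyGetD sv j 0)).length
      = (c - a).toNat := by
    simp [PySem.List.length_pyRange_one]
  rw [hlen]
  have hk : ((c - a).toNat : Int) - 1 = (((c - a).toNat - 1 : Nat) : Int) := by omega
  rw [hk, PySem.List.pyGetD_map_pyRange_one _ a c ((c - a).toNat - 1) 0 (by omega)]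
  congr 1
  omega

-- ceil(sqrt(n)) ≤ n, and ≥ 1 for n ≥ 1
theorem pvCeilSqrt_le (n : Nat) : pvCeilSqrt n ≤ n := by
  unfold pvCeilSqrt
  split_ifs with h
  · exact Nat.sqrt_le_self n
  · rcases Nat.lt_or_ge n 2 with h2 | h2
    · interval_cases n <;> simp_all [Nat.sqrt]
    · have := Nat.sqrt_lt_self (by omega : 1 < n); omega

-- the whole loop, once the adjusted bin count B is ≤ n
theorem pv_main (sv : List Int) (B : Int) (hBn : B ≤ (sv.length : Int)) :
    (PySem.List.pyRange 0 B 1).foldl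
      (fun cutoffs i =>
        let arr := pvArrLoop sv (PySem.List.len sv) []
          (PySem.List.pyRange (i * PySem.Int.truncdiv (PySem.List.len sv) B)
            ((i + 1) * PySem.Int.truncdiv (PySem.List.len sv) B) 1)
        let cutoff := PySem.List.pyGetD arr (PySem.List.len arr - 1) 0
        PySem.Set.add cutoffs cutoff)
      PySem.Set.empty
    = PySem.Set.ofList ((PySem.List.pyRange 0 B 1).map
        (fun i => PySem.List.pyGetD sv
          (min ((i + 1) * PySem.Int.truncdiv (PySem.List.len sv) B) (PySem.List.len sv) - 1) 0)) := by
  rw [PySem.Set.ofList_eq_foldl, List.foldl_map]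
  refine (PySem.List.foldl_congr_mem _ _ _ _ ?_)
  intro acc i hi
  rw [PySem.List.mem_pyRange_one] at hi
  obtain ⟨hi0, hiB⟩ := hi
  set n : Int := (sv.length : Int) with hn
  have hB1 : 1 ≤ B := by omega
  have hn1 : 1 ≤ n := by omega
  set r : Int := PySem.Int.truncdiv (PySem.List.len sv) B with hrdef
  have hre : r = n / B := by
    simp only [hrdef, PySem.Int.truncdiv, PySem.List.len_eq]
    exact Int.tdiv_eq_ediv_of_nonneg (by omega)
  have hr1 : 1 ≤ r := by
    rw [hre]; rw [Int.le_ediv_iff_mul_le (by omega : (0:Int) < B)]; omega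
  have hBr : B * r ≤ n := by
    rw [hre, mul_comm]; exact Int.ediv_mul_le n (by omega)
  have hin : i * r < n := by nlinarith
  have := pv_cutoff_eq sv r i hr1 hi0 (by simpa [hn] using hin)
  simp only [PySem.List.len_eq] at this ⊢
  rw [this]

-- ===== VERDICT (by name: the statement is the Claim_ definition above) =====
theorem equi_freq_spec : Claim_equal_equi_freq := by
  intro values num_bins _ _
  unfold Spec_equi_freq equi_freq equi_freq_alt
  set sv := PySem.List.sorted (PySem.Set.ofList values) (fun x => x) false with hsv
  set B : Int := if num_bins > PySem.List.len sv then (pvCeilSqrt sv.length : Int) else num_bins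
    with hB
  have hBn : B ≤ (sv.length : Int) := by
    rw [hB]
    split_ifs with h
    · exact_mod_cast pvCeilSqrt_le sv.length
    · simpa [PySem.List.len_eq] using h
  exact pv_main sv B hBn
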